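-- pv_equiv track=rewrite | github.com/amarildolikmeta/bayesianQLearning | scripts/convergence_frozen_lake.py | isSolved
-- ===== SOURCE A (Python) =====
-- optimal_policies=[
--                 [2, 2, 1, 0, 1, 0, 1, 0, 2, 2, 1, 0, 0, 2, 2, 0],
--                 [1, 0, 1, 0, 1, 0, 1, 0, 2, 2, 1, 0, 0, 2, 2, 0],
--                 [1, 2, 1, 0, 1, 0, 1, 0, 2, 2, 1, 0, 0, 2, 2, 0],
--                 [1, 2, 1, 0, 1, 0, 1, 0, 2, 1, 1, 0, 0, 2, 2, 0],
--                 [0, 3, 3, 3, 0, 0, 0, 0, 3, 1, 0, 0, 0, 2, 1, 0]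
--
-- ]
--
-- holes=[5, 7, 11, 12, 15]
--
-- def isSolved(policy):
--     for p in optimal_policies:
--         solved=True
--         for i in range(len(p)):
--             if i in holes:
--                 continue
--             if p[i]!=policy[i]:
--                 solved=False
--                 break
--         if solved:
--             return True
--     return False
-- ===== SOURCE B (Python) =====
-- optimal_policies=[
--                 [2, 2, 1, 0, 1, 0, 1, 0, 2, 2, 1, 0, 0, 2, 2, 0],
--                 [1, 0, 1, 0, 1, 0, 1, 0, 2, 2, 1, 0, 0, 2, 2, 0],
--                 [1, 2, 1, 0, 1, 0, 1, 0, 2, 2, 1, 0, 0, 2, 2, 0],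
--                 [1, 2, 1, 0, 1, 0, 1, 0, 2, 1, 1, 0, 0, 2, 2, 0],
--                 [0, 3, 3, 3, 0, 0, 0, 0, 3, 1, 0, 0, 0, 2, 1, 0]
-- ]
--
-- holes=[5, 7, 11, 12, 15]
--
-- def isSolved(policy):
--     # position-major pass: keep the set of still-viable candidate policies
--     candidates = list(optimal_policies)
--     for i in range(16):
--         if i in holes:
--             continue
--         if not candidates:
--             break
--         v = policy[i]
--         candidates = [p for p in candidates if p[i] == v]
--     return bool(candidates)
-- ===== Notes on version B (the rewrite author's own statement) =====
-- stated objective: alternative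
-- what changed: Transposed the candidate-major nested loops into one position-major pass over the 16 cells that filters a live set of the 5 candidate policies, with early exit when the set empties.
import Mathlib
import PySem

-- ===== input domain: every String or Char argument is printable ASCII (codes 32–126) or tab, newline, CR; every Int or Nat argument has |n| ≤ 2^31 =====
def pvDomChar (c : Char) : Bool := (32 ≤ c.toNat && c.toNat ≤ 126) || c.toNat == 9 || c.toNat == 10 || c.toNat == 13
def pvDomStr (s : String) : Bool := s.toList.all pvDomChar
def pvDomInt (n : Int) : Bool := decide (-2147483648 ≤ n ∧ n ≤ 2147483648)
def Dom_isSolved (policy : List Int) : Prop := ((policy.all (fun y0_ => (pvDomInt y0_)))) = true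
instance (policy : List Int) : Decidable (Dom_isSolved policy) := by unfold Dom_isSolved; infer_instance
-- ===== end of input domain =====

-- B replaces A's candidate-major nested loops by one position-major pass filtering the set of
-- still-viable candidate policies (alternative decomposition, same cost).

def pvOptPolicies : List (List Int) := [
  [2, 2, 1, 0, 1, 0, 1, 0, 2, 2, 1, 0, 0, 2, 2, 0],
  [1, 0, 1, 0, 1, 0, 1, 0, 2, 2, 1, 0, 0, 2, 2, 0],
  [1, 2, 1, 0, 1, 0, 1, 0, 2, 2, 1, 0, 0, 2, 2, 0],
  [1, 2, 1, 0, 1, 0, 1, 0, 2, 1, 1, 0, 0, 2, 2, 0],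
  [0, 3, 3, 3, 0, 0, 0, 0, 3, 1, 0, 0, 0, 2, 1, 0]]

def pvHoles : List Int := [5, 7, 11, 12, 15]

-- ===== PORT A =====
-- inner 'for i in range(len(p))' loop with its break
def pvInner (policy p : List Int) : List Int → Bool
  | [] => true
  | i :: rest =>
      if i ∈ pvHoles then pvInner policy p rest
      else if PySem.List.pyGetD p i 0 ≠ PySem.List.pyGetD policy i 0 then false
      else pvInner policy p rest

-- outer 'for p in optimal_policies' loop
def pvOuter (policy : List Int) : List (List Int) → Bool
  | [] => false
  | p :: rest =>
      if pvInner policy p (PySem.List.pyRange 0 (p.length : Int) 1) then true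
      else pvOuter policy rest

def isSolved (policy : List Int) : Bool := pvOuter policy pvOptPolicies

-- ===== PORT B =====
-- position-major pass: cands = candidates still matching all non-hole positions seen so far
def pvAltGo (policy : List Int) : List Int → List (List Int) → Bool
  | [], cands => !cands.isEmpty
  | i :: rest, cands =>
      if i ∈ pvHoles then pvAltGo policy rest cands
      else if cands.isEmpty then false   -- 'break' then 'return bool(candidates)'
      else pvAltGo policy rest
             (cands.filter (fun p => PySem.List.pyGetD p i 0 == PySem.List.pyGetD policy i 0))

def isSolved_alt (policy : List Int) : Bool :=
  pvAltGo policy (PySem.List.pyRange 0 16 1) pvOptPolicies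

-- ===== PRECONDITION & SPEC =====
def pvNonHoles : List Int := [0, 1, 2, 3, 4, 6, 8, 9, 10, 13, 14]

-- Pre_ excludes exactly the inputs where the Python A raises IndexError: policies of length < 15
-- on which some candidate matches at every non-hole in-range position (B raises there too).
def Pre_isSolved (policy : List Int) : Prop :=
  15 ≤ policy.length ∨
    ∀ p ∈ pvOptPolicies, ∃ i ∈ pvNonHoles,
      i < (policy.length : Int) ∧ PySem.List.pyGet? p i ≠ PySem.List.pyGet? policy i
instance (policy : List Int) : Decidable (Pre_isSolved policy) := by
  unfold Pre_isSolved; infer_instance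

def pvWitness_isSolved : List Int := [0,0,0,0,0,0,0,0,0,0,0,0,0,0,0,0]

def Spec_isSolved (policy : List Int) (out : Bool) : Prop := out = isSolved_alt policy
instance (policy : List Int) (out : Bool) : Decidable (Spec_isSolved policy out) := by
  unfold Spec_isSolved; infer_instance

-- ===== CLAIM (what is proved, stated in full; the proofs are below) =====
def Claim_equal_isSolved : Prop :=
  ∀ (policy : List Int), Dom_isSolved policy → Pre_isSolved policy →
    Spec_isSolved policy (isSolved policy)

-- ===== LEMMAS AND PROOFS =====

theorem pvInner_eq_all (policy p : List Int) (is : List Int) :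
    pvInner policy p is =
      is.all (fun i => decide (i ∈ pvHoles) ||
        (PySem.List.pyGetD p i 0 == PySem.List.pyGetD policy i 0)) := by
  induction is with
  | nil => rfl
  | cons i rest ih =>
      by_cases h : i ∈ pvHoles <;>
        by_cases h2 : PySem.List.pyGetD p i 0 = PySem.List.pyGetD policy i 0 <;>
          simp [pvInner, h, h2, ih]

theorem pvOuter_eq_any (policy : List Int) (cs : List (List Int)) :
    pvOuter policy cs =
      cs.any (fun p => pvInner policy p (PySem.List.pyRange 0 (p.length : Int) 1)) := by
  induction cs with
  | nil => rfl
  | cons p rest ih =>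
      by_cases h : pvInner policy p (PySem.List.pyRange 0 (p.length : Int) 1) = true <;>
        simp [pvOuter, h, ih]

theorem pvAltGo_eq_any (policy : List Int) (is : List Int) (cands : List (List Int)) :
    pvAltGo policy is cands =
      cands.any (fun p => is.all (fun i => decide (i ∈ pvHoles) ||
        (PySem.List.pyGetD p i 0 == PySem.List.pyGetD policy i 0))) := by
  induction is generalizing cands with
  | nil => cases cands <;> simp [pvAltGo]
  | cons i rest ih =>
      by_cases h : i ∈ pvHoles
      · simp [pvAltGo, h, ih]
      · cases cands with
        | nil => simp [pvAltGo, h]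
        | cons c cs =>
            simp only [pvAltGo, h, if_false, List.isEmpty_cons, if_neg, Bool.false_eq_true,
              not_false_eq_true, ih]
            simp [List.any_filter, h, Bool.and_comm]
  termination_by is.length

theorem isSolved_eq_alt (policy : List Int) : isSolved policy = isSolved_alt policy := by
  rw [isSolved, isSolved_alt, pvOuter_eq_any, pvAltGo_eq_any]
  simp only [pvOptPolicies, List.any_cons, List.any_nil, pvInner_eq_all]
  norm_num

-- ===== VERDICT (by name: the statement is the Claim_ definition above) =====
theorem isSolved_spec : Claim_equal_isSolved := by
  intro policy _ _
  unfold Spec_isSolved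
  exact isSolved_eq_alt policy
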